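-- pv_equiv track=rewrite | github.com/rubenalvarez98/retos | reto/ejercicio2.py | cuadrados_ordenados
-- ===== SOURCE A (Python) =====
-- def cuadrados_ordenados(array, S):
--     cuadrados_validos = []  # Lista vacía para almacenar los cuadrados válidos dentro del rango
--
--     for numero in array:  # Itera sobre cada número en el arreglo original
--         cuadrado = numero * numero  # Calcula el cuadrado del número
--         if 0 <= cuadrado <= S**2:  # Verifica si el cuadrado está dentro del rango [0, S^2]
--             cuadrados_validos.append(cuadrado)  # Agrega el cuadrado a la lista de válidos
--
--     # Función interna para ordenar la lista usando el algoritmo de ordenamiento por burbuja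
--     def bubble_sort(lst):
--         n = len(lst)  # Obtiene el tamaño de la lista
--         # Recorre toda la lista
--         for i in range(n):
--             # Recorre la lista hasta el penúltimo elemento no ordenado
--             for j in range(0, n-i-1):
--                 # Compara el elemento actual con el siguiente
--                 if lst[j] > lst[j+1]:
--                     # Si el elemento actual es mayor que el siguiente, intercámbialos
--                     lst[j], lst[j+1] = lst[j+1], lst[j]
--         # Devuelve la lista ordenada
--         return lst
--
--     return bubble_sort(cuadrados_validos)  # Ordena la lista de cuadrados válidos y la devuelve
-- ===== SOURCE B (Python) =====
-- def cuadrados_ordenados(array, S):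
--     # One pass to filter-and-square, then the library sort (Timsort) instead of bubble sort.
--     return sorted(x * x for x in array if x * x <= S ** 2)
-- ===== Notes on version B (the rewrite author's own statement) =====
-- stated objective: faster
-- what changed: Replaces the hand-written O(n^2) bubble sort (nested index loops with adjacent swaps) by a single filter-and-square comprehension passed to the library sort; the always-true lower bound 0 <= x*x is dropped.
import Mathlib
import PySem

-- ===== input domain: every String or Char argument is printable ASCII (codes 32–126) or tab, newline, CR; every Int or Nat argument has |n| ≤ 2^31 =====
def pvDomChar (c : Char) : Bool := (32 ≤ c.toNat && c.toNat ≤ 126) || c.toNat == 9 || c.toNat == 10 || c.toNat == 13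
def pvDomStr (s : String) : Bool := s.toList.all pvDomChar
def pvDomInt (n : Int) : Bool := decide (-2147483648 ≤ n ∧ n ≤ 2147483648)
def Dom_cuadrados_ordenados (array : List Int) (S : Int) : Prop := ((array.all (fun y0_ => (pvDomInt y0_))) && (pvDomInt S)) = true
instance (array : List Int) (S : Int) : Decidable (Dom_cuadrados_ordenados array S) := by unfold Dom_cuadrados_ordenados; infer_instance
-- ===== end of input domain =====

-- B replaces A's hand-written bubble sort (nested index loops with adjacent swaps) by a
-- filter-and-square pass fed to the library sort; objective: faster (O(n log n) vs O(n^2)).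

-- ===== PORT A =====
-- one compare-and-swap step of the inner loop: `if lst[j] > lst[j+1]: lst[j], lst[j+1] = lst[j+1], lst[j]`
-- (indices j and j+1 are always in range when called by the loops below, so getD is exact)
def pvSwapStep (lst : List Int) (j : Nat) : List Int :=
  if lst.getD j 0 > lst.getD (j+1) 0 then
    (lst.set j (lst.getD (j+1) 0)).set (j+1) (lst.getD j 0)
  else lst

def cuadrados_ordenados (array : List Int) (S : Int) : List Int :=
  -- for numero in array: if 0 <= numero*numero <= S**2: append
  let cuadrados_validos := array.foldl
    (fun acc numero =>
      if 0 ≤ numero * numero ∧ numero * numero ≤ S ^ 2 then acc ++ [numero * numero] else acc) []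
  -- bubble_sort: for i in range(n): for j in range(0, n-i-1): compare-swap
  let n := cuadrados_validos.length
  (List.range n).foldl (fun lst i => (List.range (n - i - 1)).foldl pvSwapStep lst) cuadrados_validos

-- ===== PORT B =====
def cuadrados_ordenados_alt (array : List Int) (S : Int) : List Int :=
  PySem.List.sorted ((array.filter (fun x => decide (x * x ≤ S ^ 2))).map (fun x => x * x))
    (fun y => y) false

-- ===== PRECONDITION & SPEC =====
def Spec_cuadrados_ordenados (array : List Int) (S : Int) (out : List Int) : Prop := out = cuadrados_ordenados_alt array S
instance (array : List Int) (S : Int) (out : List Int) : Decidable (Spec_cuadrados_ordenados array S out) := by unfold Spec_cuadrados_ordenados; infer_instance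

-- ===== CLAIM (what is proved, stated in full; the proofs are below) =====
def Claim_equal_cuadrados_ordenados : Prop := ∀ (array : List Int) (S : Int), Dom_cuadrados_ordenados array S → Spec_cuadrados_ordenados array S (cuadrados_ordenados array S)

-- ===== LEMMAS AND PROOFS =====

-- the two constructions of the filtered list of squares agree
theorem pv_filter_eq (S : Int) : ∀ (l : List Int) (acc : List Int),
    l.foldl (fun acc numero =>
      if 0 ≤ numero * numero ∧ numero * numero ≤ S ^ 2 then acc ++ [numero * numero] else acc) acc
    = acc ++ (l.filter (fun x => decide (x * x ≤ S ^ 2))).map (fun x => x * x) := by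
  intro l
  induction l with
  | nil => simp
  | cons a t ih =>
      intro acc
      simp only [List.foldl_cons, List.filter_cons]
      have hnn : 0 ≤ a * a := mul_self_nonneg a
      by_cases h : a * a ≤ S ^ 2
      · simp [h, hnn, ih]
      · simp [h, hnn, ih]

-- structural single bubble pass
def pvPass : List Int → List Int
  | [] => []
  | [a] => [a]
  | a :: b :: t => if b < a then b :: pvPass (a :: t) else a :: pvPass (b :: t)
termination_by l => l.length

theorem pvPass_length : ∀ (l : List Int), (pvPass l).length = l.length := by
  intro l
  fun_induction pvPass with
  | case1 => rfl
  | case2 a => rfl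
  | case3 a b t hlt ih => simpa using ih
  | case4 a b t hlt ih => simpa using ih

theorem pvPass_max : ∀ (l : List Int), l ≠ [] →
    ∃ ys y, pvPass l = ys ++ [y] ∧ (pvPass l).Perm l ∧ ∀ x ∈ l, x ≤ y := by
  intro l hne
  fun_induction pvPass with
  | case1 => exact absurd rfl hne
  | case2 a => exact ⟨[], a, rfl, List.Perm.refl _, by simp⟩
  | case3 a b t hlt ih =>
      obtain ⟨ys, y, heq, hperm, hmax⟩ := ih (by simp)
      refine ⟨b :: ys, y, by simp [heq], ?_, ?_⟩
      · exact (hperm.cons b).trans (List.Perm.swap a b t)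
      · intro w hw
        rcases List.mem_cons.mp hw with h1 | hw2
        · rw [h1]; exact hmax _ (by simp)
        · rcases List.mem_cons.mp hw2 with h1 | h2
          · rw [h1]; exact (lt_of_lt_of_le hlt (hmax _ (by simp))).le
          · exact hmax w (by simp [h2])
  | case4 a b t hlt ih =>
      obtain ⟨ys, y, heq, hperm, hmax⟩ := ih (by simp)
      refine ⟨a :: ys, y, by simp [heq], ?_, ?_⟩
      · exact hperm.cons a
      · intro w hw
        rcases List.mem_cons.mp hw with h1 | hw2
        · rw [h1]; exact le_trans (not_lt.mp hlt) (hmax _ (by simp))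
        · exact hmax w hw2

theorem pvPass_snoc : ∀ (xs : List Int) (c : Int) (ys : List Int) (y : Int),
    pvPass xs = ys ++ [y] →
    pvPass (xs ++ [c]) = ys ++ (if c < y then [c, y] else [y, c]) := by
  intro xs c
  fun_induction pvPass xs with
  | case1 => intro ys y h; exact absurd h (by simp)
  | case2 x =>
      intro ys y h
      obtain ⟨h1, h2⟩ : ys = [] ∧ y = x := by
        cases ys with
        | nil => simpa [eq_comm] using h
        | cons b bs => simp at h
      subst h1
      by_cases hc : c < y <;> simp [pvPass, hc, ← h2]
  | case3 a b t hlt ih =>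
      intro ys y h
      cases ys with
      | nil =>
          exfalso
          have h1 : (b :: pvPass (a :: t)).length = 1 := by rw [h]; simp
          simp [pvPass_length] at h1
      | cons c' cs =>
          simp only [List.cons_append, List.cons.injEq] at h
          obtain ⟨hc', hrest⟩ := h
          subst hc'
          have hrec := ih cs y hrest
          show pvPass (a :: b :: (t ++ [c])) = _
          simp only [pvPass, if_pos hlt]
          rw [show a :: (t ++ [c]) = (a :: t) ++ [c] by simp, hrec]
          simp
  | case4 a b t hlt ih =>
      intro ys y h
      cases ys with
      | nil =>
          exfalso
          have h1 : (a :: pvPass (b :: t)).length = 1 := by rw [h]; simp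
          simp [pvPass_length] at h1
      | cons c' cs =>
          simp only [List.cons_append, List.cons.injEq] at h
          obtain ⟨hc', hrest⟩ := h
          subst hc'
          have hrec := ih cs y hrest
          show pvPass (a :: b :: (t ++ [c])) = _
          simp only [pvPass, if_neg hlt]
          rw [show b :: (t ++ [c]) = (b :: t) ++ [c] by simp, hrec]
          simp

-- the swap step at index |ys| on ys ++ y :: z :: zs
theorem pvSwapStep_at : ∀ (ys : List Int) (y z : Int) (zs : List Int),
    pvSwapStep (ys ++ y :: z :: zs) ys.length
      = ys ++ (if z < y then z :: y :: zs else y :: z :: zs) := by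
  intro ys
  induction ys with
  | nil =>
      intro y z zs
      by_cases h : z < y <;> simp [pvSwapStep, List.getD, h]
  | cons a t ih =>
      intro y z zs
      have := ih y z zs
      by_cases h : z < y <;>
        simp [pvSwapStep, List.getD, h, List.length_cons] at this ⊢

-- the inner loop `for j in range(0, m)` is one bubble pass over the first m+1 elements
theorem pv_inner_eq : ∀ (m : Nat) (l : List Int), m + 1 ≤ l.length →
    (List.range m).foldl pvSwapStep l = pvPass (l.take (m+1)) ++ l.drop (m+1) := by
  intro m
  induction m with
  | zero =>
      intro l hl
      cases l with
      | nil => simp at hl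
      | cons a t => simp [pvPass]
  | succ m ih =>
      intro l hl
      have hm1 : m + 1 ≤ l.length := by omega
      have hlt : m + 1 < l.length := by omega
      have hIH := ih l hm1
      have htlen : (l.take (m+1)).length = m + 1 := by simp; omega
      obtain ⟨ys, y, heq, hperm, -⟩ := pvPass_max (l.take (m+1)) (by
        intro hnil; rw [hnil] at htlen; simp at htlen)
      have hyslen : ys.length = m := by
        have hle := hperm.length_eq
        rw [heq] at hle; simp [htlen] at hle; omega
      have hdrop : l.drop (m+1) = l[m+1] :: l.drop (m+2) := by
        rw [List.drop_eq_getElem_cons hlt]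
      have htake : l.take (m+2) = l.take (m+1) ++ [l[m+1]] := by
        rw [show m+2 = (m+1)+1 from rfl, List.take_add_one,
          List.getElem?_eq_getElem hlt]
        rfl
      have hsw := pvSwapStep_at ys y l[m+1] (l.drop (m+2))
      rw [hyslen] at hsw
      rw [List.range_succ, List.foldl_append, hIH, List.foldl_cons, List.foldl_nil]
      rw [show m+1+1 = m+2 from rfl, hdrop,
        show pvPass (l.take (m+1)) ++ l[m+1] :: l.drop (m+2)
           = ys ++ y :: l[m+1] :: l.drop (m+2) by simp [heq]]
      rw [hsw, htake, pvPass_snoc (l.take (m+1)) l[m+1] ys y heq]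
      by_cases hc : l[m+1] < y <;> simp [hc]

-- outer-loop invariant of the bubble sort
theorem pv_outer_inv (n : Nat) (cs : List Int) (hn : cs.length = n) :
    ∀ (i : Nat), i ≤ n →
    ((List.range i).foldl (fun lst i => (List.range (n - i - 1)).foldl pvSwapStep lst) cs).Perm cs ∧
    (((List.range i).foldl (fun lst i => (List.range (n - i - 1)).foldl pvSwapStep lst) cs).drop (n - i)).Pairwise (· ≤ ·) ∧
    ∀ x ∈ ((List.range i).foldl (fun lst i => (List.range (n - i - 1)).foldl pvSwapStep lst) cs).take (n - i),
      ∀ y ∈ ((List.range i).foldl (fun lst i => (List.range (n - i - 1)).foldl pvSwapStep lst) cs).drop (n - i), x ≤ y := by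
  intro i
  induction i with
  | zero =>
      intro _
      have hd : cs.drop (n - 0) = [] := List.drop_eq_nil_of_le (by omega)
      simp only [List.range_zero, List.foldl_nil, hd]
      exact ⟨List.Perm.refl _, List.Pairwise.nil, by intro x _ y hy; cases hy⟩
  | succ i ih =>
      intro hi1
      have hi : i ≤ n := by omega
      obtain ⟨hperm, hpw, hcross⟩ := ih hi
      set r := (List.range i).foldl (fun lst i => (List.range (n - i - 1)).foldl pvSwapStep lst) cs with hr
      have hrlen : r.length = n := by rw [hperm.length_eq, hn]
      have hm : (n - i - 1) + 1 = n - i := by omega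
      have hmle : (n - i - 1) + 1 ≤ r.length := by omega
      have hstep : (List.range (i+1)).foldl (fun lst i => (List.range (n - i - 1)).foldl pvSwapStep lst) cs
          = (List.range (n - i - 1)).foldl pvSwapStep r := by
        rw [List.range_succ, List.foldl_append, List.foldl_cons, List.foldl_nil, ← hr]
      have hinner := pv_inner_eq (n - i - 1) r hmle
      rw [hm] at hinner
      have htlen : (r.take (n - i)).length = n - i := by simp; omega
      obtain ⟨ys, y, heq, hpassperm, hmax⟩ := pvPass_max (r.take (n - i)) (by
        intro hnil; rw [hnil] at htlen; simp at htlen; omega)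
      have hyslen : ys.length = n - i - 1 := by
        have hle := hpassperm.length_eq
        rw [heq] at hle; simp [htlen] at hle; omega
      have hymem : y ∈ r.take (n - i) := hpassperm.mem_iff.mp (by simp [heq])
      have hsplit : pvPass (r.take (n - i)) ++ r.drop (n - i)
          = ys ++ (y :: r.drop (n - i)) := by simp [heq]
      have h1 : n - (i + 1) = ys.length := by omega
      rw [hstep, hinner, hsplit, h1]
      refine ⟨?_, ?_, ?_⟩
      · have : (ys ++ y :: r.drop (n - i)).Perm (r.take (n - i) ++ r.drop (n - i)) := by
          rw [← hsplit]; exact hpassperm.append_right _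
        rw [List.take_append_drop] at this
        exact this.trans hperm
      · rw [List.drop_left]
        refine List.pairwise_cons.mpr ⟨?_, hpw⟩
        intro b hb
        exact hcross y hymem b hb
      · rw [List.take_left, List.drop_left]
        intro x hx b hb
        have hxmem : x ∈ r.take (n - i) := hpassperm.mem_iff.mp (by simp [heq, hx])
        rcases List.mem_cons.mp hb with hb1 | hb2
        · rw [hb1]; exact hmax x hxmem
        · exact hcross x hxmem b hb2

-- ===== VERDICT (by name: the statement is the Claim_ definition above) =====
theorem cuadrados_ordenados_spec : Claim_equal_cuadrados_ordenados := by
  intro array S _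
  unfold Spec_cuadrados_ordenados cuadrados_ordenados cuadrados_ordenados_alt
  rw [pv_filter_eq S array []]
  simp only [List.nil_append]
  set cs := (array.filter (fun x => decide (x * x ≤ S ^ 2))).map (fun x => x * x) with hcs
  obtain ⟨hperm, hpw, _⟩ := pv_outer_inv cs.length cs rfl cs.length (le_refl _)
  simp only [Nat.sub_self, List.drop_zero] at hpw
  exact (PySem.List.sorted_id_eq_of_perm_of_pairwise _ _ hperm hpw).symm
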